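-- pv_equiv track=rewrite | github.com/siyu-li/DRL-robot-navigation-IR-SIM | robot_nav/models/MARL/marlTD3/supervised_dataset_group.py | generate_all_groups
-- ===== SOURCE A (Python) =====
-- from itertools import combinations
-- from typing import Literal, Optional, List, Dict, Any, Tuple, Union
--
-- def generate_all_groups(num_robots: int, group_sizes: List[int] = [2, 3]) -> List[List[int]]:
--     """
--     Generate all possible robot group combinations.
--
--     Args:
--         num_robots (int): Total number of robots.
--         group_sizes (List[int]): List of group sizes to generate.
--
--     Returns:
--         List[List[int]]: List of robot index groups.
--
--     Example:
--         >>> generate_all_groups(6, [2, 3])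
--         [[0, 1], [0, 2], ..., [0, 1, 2], [0, 1, 3], ...]
--     """
--     all_groups = []
--     robot_indices = list(range(num_robots))
--
--     for size in group_sizes:
--         if size <= num_robots:
--             for combo in combinations(robot_indices, size):
--                 all_groups.append(list(combo))
--
--     return all_groups
-- ===== SOURCE B (Python) =====
-- def generate_all_groups(num_robots, group_sizes=[2, 3]):
--     def choose(start, k):
--         if k == 0:
--             return [[]]
--         res = []
--         for i in range(start, num_robots):
--             for rest in choose(i + 1, k - 1):
--                 res.append([i] + rest)
--         return res
--
--     all_groups = []
--     for size in group_sizes: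
--         if size <= num_robots:
--             all_groups.extend(choose(0, size))
--     return all_groups
-- ===== Notes on version B (the rewrite author's own statement) =====
-- stated objective: alternative
-- what changed: Replaces the itertools.combinations library call with a hand-written recursive backtracking generator choose(start, k) that emits the same lexicographic order, called once per group size.
import Mathlib
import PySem

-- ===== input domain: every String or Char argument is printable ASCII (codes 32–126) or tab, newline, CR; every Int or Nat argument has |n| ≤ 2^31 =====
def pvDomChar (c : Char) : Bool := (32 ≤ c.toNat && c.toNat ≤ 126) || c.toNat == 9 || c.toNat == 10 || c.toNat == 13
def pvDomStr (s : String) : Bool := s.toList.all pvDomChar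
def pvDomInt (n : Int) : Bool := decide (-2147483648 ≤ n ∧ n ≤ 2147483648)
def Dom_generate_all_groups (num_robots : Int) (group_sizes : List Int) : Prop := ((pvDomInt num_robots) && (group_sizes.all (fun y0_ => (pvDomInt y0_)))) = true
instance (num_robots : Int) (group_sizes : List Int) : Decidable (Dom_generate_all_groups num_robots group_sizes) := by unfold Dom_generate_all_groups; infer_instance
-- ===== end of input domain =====

-- B replaces the itertools.combinations call with a recursive backtracking generator
-- emitting the same lexicographic order (alternative decomposition, same cost).

-- ===== PORT A =====
-- itertools.combinations(xs, k) on a duplicate-free index list, as the list of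
-- k-element sublists in the lexicographic order itertools emits.
def pyComb (xs : List Int) (k : Nat) : List (List Int) :=
  match k, xs with
  | 0, _ => [[]]
  | _ + 1, [] => []
  | k + 1, x :: rest => (pyComb rest k).map (x :: ·) ++ pyComb rest (k + 1)

def generate_all_groups (num_robots : Int) (group_sizes : List Int) : List (List Int) :=
  let robot_indices := PySem.List.pyRange 0 num_robots 1
  group_sizes.foldl
    (fun all_groups size =>
      if size ≤ num_robots then all_groups ++ pyComb robot_indices size.toNat
      else all_groups)
    []

-- ===== PORT B =====
-- choose(start, k) from Source B: if k == 0 yield [[]], else loop i over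
-- range(start, num_robots) and prepend i to each result of choose(i+1, k-1).
def chooseB (num_robots start k : Int) : List (List Int) :=
  if k = 0 then [[]]
  else
    (PySem.List.pyRange start num_robots 1).attach.foldl
      (fun res i => res ++ (chooseB num_robots (i.1 + 1) (k - 1)).map (i.1 :: ·)) []
termination_by (num_robots - start).toNat
decreasing_by
  have h := PySem.List.mem_pyRange_one.mp i.2
  omega

def generate_all_groups_alt (num_robots : Int) (group_sizes : List Int) : List (List Int) :=
  group_sizes.foldl
    (fun all_groups size =>
      if size ≤ num_robots then all_groups ++ chooseB num_robots 0 size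
      else all_groups)
    []

-- ===== PRECONDITION & SPEC =====
-- Pre_ excludes inputs where A raises: any negative group size that passes the
-- `size <= num_robots` guard makes itertools.combinations raise ValueError.
def Pre_generate_all_groups (num_robots : Int) (group_sizes : List Int) : Prop :=
  ∀ s ∈ group_sizes, s ≤ num_robots → 0 ≤ s
instance (num_robots : Int) (group_sizes : List Int) : Decidable (Pre_generate_all_groups num_robots group_sizes) := by unfold Pre_generate_all_groups; infer_instance
def pvWitness_generate_all_groups : Int × List Int := (4, [2, 3])

def Spec_generate_all_groups (num_robots : Int) (group_sizes : List Int) (out : List (List Int)) : Prop := out = generate_all_groups_alt num_robots group_sizes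
instance (num_robots : Int) (group_sizes : List Int) (out : List (List Int)) : Decidable (Spec_generate_all_groups num_robots group_sizes out) := by unfold Spec_generate_all_groups; infer_instance

-- ===== CLAIM (what is proved, stated in full; the proofs are below) =====
def Claim_equal_generate_all_groups : Prop := ∀ (num_robots : Int) (group_sizes : List Int), Dom_generate_all_groups num_robots group_sizes → Pre_generate_all_groups num_robots group_sizes → Spec_generate_all_groups num_robots group_sizes (generate_all_groups num_robots group_sizes)

-- ===== LEMMAS AND PROOFS =====

-- chooseB's loop body, flattened: attach-foldl = flatMap.
lemma chooseB_flat (num_robots start k : Int) (hk : k ≠ 0) :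
    chooseB num_robots start k
      = (PySem.List.pyRange start num_robots 1).flatMap
          (fun i => (chooseB num_robots (i + 1) (k - 1)).map (i :: ·)) := by
  rw [chooseB, if_neg hk]
  rw [List.foldl_attach
        (f := fun res i => res ++ (chooseB num_robots (i + 1) (k - 1)).map (i :: ·))]
  rw [PySem.List.foldl_append_eq_flatMap, List.nil_append]

-- k ≠ 0 with an empty range yields no group.
lemma chooseB_nil {num_robots start k : Int} (h : num_robots ≤ start) (hk : k ≠ 0) :
    chooseB num_robots start k = [] := by
  rw [chooseB_flat _ _ _ hk, PySem.List.pyRange_one_eq_nil h]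
  rfl

-- Core equivalence: the backtracking generator equals lexicographic combinations
-- of the index range, for nonnegative k.
lemma chooseB_eq (num_robots : Int) :
    ∀ (m : Nat) (start k : Int), (num_robots - start).toNat ≤ m → 0 ≤ k →
      chooseB num_robots start k = pyComb (PySem.List.pyRange start num_robots 1) k.toNat := by
  intro m
  induction m with
  | zero =>
    intro start k hle hk
    have hns : num_robots ≤ start := by omega
    rw [PySem.List.pyRange_one_eq_nil hns]
    by_cases h0 : k = 0
    · subst h0; rw [chooseB]; simp [pyComb]
    · rw [chooseB_nil hns h0]
      have : k.toNat = (k.toNat - 1) + 1 := by omega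
      rw [this]; rfl
  | succ m IH =>
    intro start k hle hk
    by_cases h0 : k = 0
    · subst h0; rw [chooseB]; simp [pyComb]
    · rw [chooseB_flat _ _ _ h0]
      by_cases hs : start < num_robots
      · rw [PySem.List.pyRange_one_cons hs, List.flatMap_cons]
        have hk1 : (0:Int) ≤ k - 1 := by omega
        have hrec : (num_robots - (start + 1)).toNat ≤ m := by omega
        have e1 : chooseB num_robots (start + 1) (k - 1)
            = pyComb (PySem.List.pyRange (start + 1) num_robots 1) (k - 1).toNat :=
          IH (start + 1) (k - 1) hrec hk1
        have e2 : (PySem.List.pyRange (start + 1) num_robots 1).flatMap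
              (fun i => (chooseB num_robots (i + 1) (k - 1)).map (i :: ·))
            = pyComb (PySem.List.pyRange (start + 1) num_robots 1) k.toNat := by
          rw [← chooseB_flat _ _ _ h0]
          exact IH (start + 1) k hrec hk
        rw [e1, e2]
        have hkt : k.toNat = (k - 1).toNat + 1 := by omega
        rw [hkt]
        rfl
      · rw [PySem.List.pyRange_one_eq_nil (by omega : num_robots ≤ start)]
        have : k.toNat = (k.toNat - 1) + 1 := by omega
        rw [this]
        rfl
  
-- The two outer folds agree step by step under Pre_.
lemma folds_eq (num_robots : Int) (gs : List Int)
    (hpre : ∀ s ∈ gs, s ≤ num_robots → 0 ≤ s) :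
    ∀ acc : List (List Int),
      gs.foldl (fun a size => if size ≤ num_robots
          then a ++ pyComb (PySem.List.pyRange 0 num_robots 1) size.toNat else a) acc
      = gs.foldl (fun a size => if size ≤ num_robots
          then a ++ chooseB num_robots 0 size else a) acc := by
  induction gs with
  | nil => intro acc; rfl
  | cons s rest ih =>
    intro acc
    have htail : ∀ t ∈ rest, t ≤ num_robots → 0 ≤ t := fun t ht => hpre t (List.mem_cons_of_mem _ ht)
    simp only [List.foldl_cons]
    rw [ih htail]
    congr 1
    by_cases hs : s ≤ num_robots
    · have h0 : 0 ≤ s := hpre s (List.mem_cons_self) hs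
      rw [if_pos hs, if_pos hs,
          chooseB_eq num_robots (num_robots - 0).toNat 0 s (le_refl _) h0]
    · rw [if_neg hs, if_neg hs]

-- ===== VERDICT (by name: the statement is the Claim_ definition above) =====
theorem generate_all_groups_spec : Claim_equal_generate_all_groups := by
  intro num_robots group_sizes _ hpre
  unfold Spec_generate_all_groups generate_all_groups generate_all_groups_alt
  exact folds_eq num_robots group_sizes hpre []
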